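-- pv_equiv track=rewrite | github.com/LordBrom/programming-challenges | adventofcode/y2018/day2.py | part1
-- ===== SOURCE A (Python) =====
-- def part1(data, test=False) -> str:
--     pairs = 0
--     trips = 0
--     for id in data:
--         foundLetter = {}
--         for l in id:
--             if not l in foundLetter:
--                 foundLetter[l] = 0
--             foundLetter[l] += 1
--
--         foundPair = False
--         foundTrip = False
--
--         for l in foundLetter:
--             if not foundPair and foundLetter[l] == 2:
--                 foundPair = True
--                 pairs += 1
--             elif not foundTrip and foundLetter[l] == 3:
--                 foundTrip = True
--                 trips += 1
--
--     return str(pairs * trips)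
-- ===== SOURCE B (Python) =====
-- def part1(data, test=False) -> str:
--     # Idiomatic re-implementation: no counting dict, no flag state machine;
--     # two independent comprehension passes, per-ID check by direct recount.
--     pairs = sum(1 for id in data if any(list(id).count(c) == 2 for c in id))
--     trips = sum(1 for id in data if any(list(id).count(c) == 3 for c in id))
--     return str(pairs * trips)
-- ===== Notes on version B (the rewrite author's own statement) =====
-- stated objective: idiomatic
-- what changed: Replaces the per-ID counting dict plus a stateful pair/trip flag loop over its keys with two independent comprehension passes that count each ID directly via any(list(id).count(c)==k for c in id).
import Mathlib
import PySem

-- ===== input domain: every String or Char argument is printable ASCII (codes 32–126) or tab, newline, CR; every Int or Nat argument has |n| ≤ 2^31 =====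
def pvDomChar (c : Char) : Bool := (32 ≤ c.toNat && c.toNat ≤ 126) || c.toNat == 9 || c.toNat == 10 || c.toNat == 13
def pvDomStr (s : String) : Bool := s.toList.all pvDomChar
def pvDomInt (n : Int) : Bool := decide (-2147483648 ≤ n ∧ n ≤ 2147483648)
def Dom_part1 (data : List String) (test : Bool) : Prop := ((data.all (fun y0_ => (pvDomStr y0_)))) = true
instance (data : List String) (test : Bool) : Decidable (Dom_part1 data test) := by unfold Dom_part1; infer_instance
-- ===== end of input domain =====

-- B replaces A's per-ID counting dict + stateful pair/trip flag loop with two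
-- independent comprehension passes checking each ID by direct recount (idiomatic; not faster).


-- ===== PORT A =====
def part1 (data : List String) (test : Bool) : String :=
  -- pairs, trips accumulated over the ids
  let r : Int × Int := data.foldl (fun acc id =>
    -- for l in id: if not l in foundLetter: foundLetter[l] = 0 ; foundLetter[l] += 1
    let foundLetter : PySem.Dict Char Int := id.toList.foldl (fun d l =>
      let d := if d.contains l then d else d.insert l 0
      d.insert l (d.getD l 0 + 1)) PySem.Dict.empty
    -- for l in foundLetter: the flag loop; state = (foundPair, foundTrip, pairs, trips)
    let s : Bool × Bool × Int × Int := foundLetter.keys.foldl (fun s l =>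
      if !s.1 && (foundLetter.getD l 0 == 2) then (true, s.2.1, s.2.2.1 + 1, s.2.2.2)
      else if !s.2.1 && (foundLetter.getD l 0 == 3) then (s.1, true, s.2.2.1, s.2.2.2 + 1)
      else s) (false, false, acc.1, acc.2)
    (s.2.2.1, s.2.2.2)) (0, 0)
  PySem.Int.toStr (r.1 * r.2)

-- ===== PORT B =====
def part1_alt (data : List String) (test : Bool) : String :=
  let pairs : Int := (data.countP (fun id => id.toList.any (fun c => PySem.List.count id.toList c == 2)) : Int)
  let trips : Int := (data.countP (fun id => id.toList.any (fun c => PySem.List.count id.toList c == 3)) : Int)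
  PySem.Int.toStr (pairs * trips)

-- ===== PRECONDITION & SPEC =====
def Spec_part1 (data : List String) (test : Bool) (out : String) : Prop := out = part1_alt data test
instance (data : List String) (test : Bool) (out : String) : Decidable (Spec_part1 data test out) := by unfold Spec_part1; infer_instance

-- ===== CLAIM (what is proved, stated in full; the proofs are below) =====
def Claim_equal_part1 : Prop := ∀ (data : List String) (test : Bool), Dom_part1 data test → Spec_part1 data test (part1 data test)

-- ===== LEMMAS AND PROOFS =====

-- A's dict-building step is the standard counter step.
lemma dictStep_eq (d : PySem.Dict Char Int) (l : Char) :
    (let d' := if d.contains l then d else d.insert l 0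
     d'.insert l (d'.getD l 0 + 1)) = d.insert l (d.getD l 0 + 1) := by
  by_cases h : d.contains l = true
  · simp [h]
  · simp only [Bool.not_eq_true] at h
    simp [h, PySem.Dict.getD_insert_self, PySem.Dict.insert_insert_self,
      PySem.Dict.getD_of_not_contains d 0 h]

-- The flag loop over keys, for an arbitrary value function c.
lemma flagLoop (c : Char → Int) (ks : List Char) (fp ft : Bool) (p t : Int) :
    ks.foldl (fun s l =>
      if !s.1 && (c l == 2) then (true, s.2.1, s.2.2.1 + 1, s.2.2.2)
      else if !s.2.1 && (c l == 3) then (s.1, true, s.2.2.1, s.2.2.2 + 1)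
      else s) ((fp, ft, p, t) : Bool × Bool × Int × Int)
    = (fp || ks.any (fun l => c l == 2), ft || ks.any (fun l => c l == 3),
       p + (if !fp && ks.any (fun l => c l == 2) then 1 else 0),
       t + (if !ft && ks.any (fun l => c l == 3) then 1 else 0)) := by
  induction ks generalizing fp ft p t with
  | nil => simp
  | cons k ks ih =>
    simp only [List.foldl_cons]
    by_cases h2 : c k = 2 <;> by_cases h3 : c k = 3 <;> cases fp <;> cases ft <;>
      simp only [h2, h3, Bool.not_false, Bool.not_true, Bool.false_and, Bool.true_and,
        beq_iff_eq, reduceIte] <;>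
      rw [ih] <;>
      by_cases hA : ks.any (fun l => c l == 2) = true <;>
      by_cases hB : ks.any (fun l => c l == 3) = true <;>
      simp [h2, h3, hA, hB, List.any_cons]

-- Any-over-distinct-keys of the counter equals any-over-positions with a direct recount.
lemma anyCount (xs : List Char) (n : Int) :
    ((PySem.Set.ofList xs).any fun l => (PySem.Dict.counter xs).getD l 0 == n)
      = xs.any (fun c => ((List.count c xs : Int) == n)) := by
  rw [Bool.eq_iff_iff]
  simp only [List.any_eq_true, PySem.Set.mem_ofList, PySem.Dict.getD_counter]

-- A's per-id loop body, reduced to B's two per-id tests.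
lemma idStep (acc : Int × Int) (id : String) :
    (let foundLetter : PySem.Dict Char Int := id.toList.foldl (fun d l =>
       let d := if d.contains l then d else d.insert l 0
       d.insert l (d.getD l 0 + 1)) PySem.Dict.empty
     let s : Bool × Bool × Int × Int := foundLetter.keys.foldl (fun s l =>
       if !s.1 && (foundLetter.getD l 0 == 2) then (true, s.2.1, s.2.2.1 + 1, s.2.2.2)
       else if !s.2.1 && (foundLetter.getD l 0 == 3) then (s.1, true, s.2.2.1, s.2.2.2 + 1)
       else s) (false, false, acc.1, acc.2)
     ((s.2.2.1, s.2.2.2) : Int × Int))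
    = (acc.1 + (if id.toList.any (fun c => PySem.List.count id.toList c == 2) then 1 else 0),
       acc.2 + (if id.toList.any (fun c => PySem.List.count id.toList c == 3) then 1 else 0)) := by
  have hd : id.toList.foldl (fun d l =>
      let d := if d.contains l then d else d.insert l 0
      d.insert l (d.getD l 0 + 1)) PySem.Dict.empty = PySem.Dict.counter id.toList := by
    rw [PySem.List.foldl_congr_mem _ _ (fun d l => d.insert l (d.getD l 0 + 1)) _
      (fun acc x _ => dictStep_eq acc x)]
    exact PySem.Dict.foldl_insert_getD_add_one_eq_counter id.toList
  simp only [hd, PySem.Dict.keys_counter, flagLoop, anyCount, Bool.not_false, Bool.true_and]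
  simp only [PySem.List.count_eq, List.any_eq_true, beq_iff_eq,
    show ∀ (m : Nat), ((m : Int) = 2 ↔ m = 2) from fun m => by exact_mod_cast Iff.rfl,
    show ∀ (m : Nat), ((m : Int) = 3 ↔ m = 3) from fun m => by exact_mod_cast Iff.rfl]

-- ===== VERDICT (by name: the statement is the Claim_ definition above) =====
theorem part1_spec : Claim_equal_part1 := by
  intro data test _
  show part1 data test = part1_alt data test
  unfold part1 part1_alt
  rw [PySem.List.foldl_congr_mem _ _
    (fun (acc : Int × Int) id =>
      (acc.1 + (if id.toList.any (fun c => PySem.List.count id.toList c == 2) then 1 else 0),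
       acc.2 + (if id.toList.any (fun c => PySem.List.count id.toList c == 3) then 1 else 0)))
    _ (fun acc id _ => idStep acc id)]
  have hfold : List.foldl (fun (acc : Int × Int) id =>
      (acc.1 + (if id.toList.any (fun c => PySem.List.count id.toList c == 2) then 1 else 0),
       acc.2 + (if id.toList.any (fun c => PySem.List.count id.toList c == 3) then 1 else 0)))
      ((0, 0) : Int × Int) data
      = ((List.countP (fun id => id.toList.any (fun c => PySem.List.count id.toList c == 2)) data : Int),
         (List.countP (fun id => id.toList.any (fun c => PySem.List.count id.toList c == 3)) data : Int)) := by
    simp only [show ∀ (a : Int) (b : Bool), (a + if b then 1 else 0) = (if b then a + 1 else a)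
      from fun a b => by cases b <;> simp]
    rw [PySem.List.foldl_prod_mk
      (f := fun (a : Int) (id : String) => if id.toList.any (fun c => PySem.List.count id.toList c == 2) then a + 1 else a)
      (g := fun (a : Int) (id : String) => if id.toList.any (fun c => PySem.List.count id.toList c == 3) then a + 1 else a)]
    simp only [PySem.List.foldl_if_add_one, zero_add]
  rw [hfold]
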